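-- pv_equiv track=rewrite | github.com/Hossein-sfa/AI-course | 8 Queens/hill_climbing.py | has_interfere
-- ===== SOURCE A (Python) =====
-- def has_interfere(x, y, board):
--     x_copy = x + 1
--     y_copy = y + 1
--     while x_copy < 8 and y_copy < 8:
--         if board[x_copy][y_copy] == 'Q':
--             return True
--         x_copy += 1
--         y_copy += 1
--
--     x_copy = x - 1
--     y_copy = y - 1
--     while x_copy >= 0 and y_copy >= 0:
--         if board[x_copy][y_copy] == 'Q':
--             return True
--         x_copy -= 1
--         y_copy -= 1
--
--     x_copy = x + 1
--     y_copy = y - 1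
--     while x_copy < 8 and y_copy >= 0:
--         if board[x_copy][y_copy] == 'Q':
--             return True
--         x_copy += 1
--         y_copy -= 1
--
--     x_copy = x - 1
--     y_copy = y + 1
--     while x_copy >= 0 and y_copy < 8:
--         if board[x_copy][y_copy] == 'Q':
--             return True
--         x_copy -= 1
--         y_copy += 1
--
--     return False
-- ===== SOURCE B (Python) =====
-- def has_interfere(x, y, board):
--     spans = ((1, 1, min(7 - x, 7 - y)), (-1, -1, min(x, y)),
--              (1, -1, min(7 - x, y)), (-1, 1, min(x, 7 - y)))
--     top = max(min(7 - x, 7 - y), min(x, y), min(7 - x, y), min(x, 7 - y))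
--     return any(board[x + s * d][y + t * d] == 'Q'
--                for d in range(1, top + 1)
--                for s, t, span in spans
--                if d <= span)
-- ===== Notes on version B (the rewrite author's own statement) =====
-- stated objective: alternative
-- what changed: A walks the four diagonal rays one after another with mutable stepping counters and per-ray early exit; B precomputes each ray's reach as a closed-form span (min arithmetic) and makes one interleaved distance-major sweep over d = 1..max(spans), testing the four compass offsets at each distance.
import Mathlib
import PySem

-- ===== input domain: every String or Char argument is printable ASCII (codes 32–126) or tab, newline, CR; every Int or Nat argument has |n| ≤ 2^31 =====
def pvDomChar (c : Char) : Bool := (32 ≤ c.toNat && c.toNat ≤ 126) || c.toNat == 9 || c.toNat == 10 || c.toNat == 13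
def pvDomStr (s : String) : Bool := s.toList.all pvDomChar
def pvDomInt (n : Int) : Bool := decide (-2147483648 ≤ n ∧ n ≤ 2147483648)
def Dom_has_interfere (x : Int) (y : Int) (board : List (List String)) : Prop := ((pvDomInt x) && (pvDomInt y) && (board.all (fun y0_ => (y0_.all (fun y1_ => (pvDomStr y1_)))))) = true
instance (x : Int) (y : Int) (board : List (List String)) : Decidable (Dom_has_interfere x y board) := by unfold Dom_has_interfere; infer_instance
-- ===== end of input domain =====

-- B replaces A's four sequential ray walks (mutable stepping counters, one ray at a time)
-- by a single distance-major sweep: each ray's reach is a closed-form span, and one loop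
-- over d = 1..max(spans) tests the four compass offsets at each distance (objective: alternative).

-- ===== PORT A =====
-- board[x_copy][y_copy] == 'Q' (Python indexing: negative index wraps, out of range = IndexError = none)
def pvCellA (board : List (List String)) (i j : Int) : Bool :=
  ((PySem.List.pyGet? board i).bind (fun r => PySem.List.pyGet? r j)) == some "Q"

-- first while loop: x_copy, y_copy start at x+1, y+1 and both increase while < 8
def pvLoop1 (board : List (List String)) (xc yc : Int) : Bool :=
  if h : xc < 8 ∧ yc < 8 then
    if pvCellA board xc yc then true else pvLoop1 board (xc + 1) (yc + 1)
  else false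
termination_by (8 - xc).toNat
decreasing_by omega

-- second while loop: both decrease while ≥ 0
def pvLoop2 (board : List (List String)) (xc yc : Int) : Bool :=
  if h : 0 ≤ xc ∧ 0 ≤ yc then
    if pvCellA board xc yc then true else pvLoop2 board (xc - 1) (yc - 1)
  else false
termination_by (xc + 1).toNat
decreasing_by omega

-- third while loop: x increases, y decreases
def pvLoop3 (board : List (List String)) (xc yc : Int) : Bool :=
  if h : xc < 8 ∧ 0 ≤ yc then
    if pvCellA board xc yc then true else pvLoop3 board (xc + 1) (yc - 1)
  else false
termination_by (8 - xc).toNat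
decreasing_by omega

-- fourth while loop: x decreases, y increases
def pvLoop4 (board : List (List String)) (xc yc : Int) : Bool :=
  if h : 0 ≤ xc ∧ yc < 8 then
    if pvCellA board xc yc then true else pvLoop4 board (xc - 1) (yc + 1)
  else false
termination_by (xc + 1).toNat
decreasing_by omega

def has_interfere (x : Int) (y : Int) (board : List (List String)) : Bool :=
  pvLoop1 board (x + 1) (y + 1) || pvLoop2 board (x - 1) (y - 1) ||
  pvLoop3 board (x + 1) (y - 1) || pvLoop4 board (x - 1) (y + 1)

-- ===== PORT B =====
-- board[x + s*d][y + t*d] == 'Q' in B's generator expression (Python indexing: negative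
-- index wraps, out of range = IndexError = none)
def pvCellB (board : List (List String)) (i j : Int) : Bool :=
  ((PySem.List.pyGet? board i).bind (fun r => PySem.List.pyGet? r j)) == some "Q"

-- spans = ((1,1,min(7-x,7-y)), (-1,-1,min(x,y)), (1,-1,min(7-x,y)), (-1,1,min(x,7-y)))
def pvSpansB (x y : Int) : List (Int × Int × Int) :=
  [(1, 1, min (7 - x) (7 - y)), (-1, -1, min x y), (1, -1, min (7 - x) y), (-1, 1, min x (7 - y))]

-- any(board[x+s*d][y+t*d]=='Q' for d in range(1, top+1) for s,t,span in spans if d <= span)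
def has_interfere_alt (x : Int) (y : Int) (board : List (List String)) : Bool :=
  let spans := pvSpansB x y
  let top := max (max (max (min (7 - x) (7 - y)) (min x y)) (min (7 - x) y)) (min x (7 - y))
  (PySem.List.pyRange 1 (top + 1) 1).any (fun d =>
    spans.any (fun q => decide (d ≤ q.2.2) && pvCellB board (x + q.1 * d) (y + q.2.1 * d)))

-- ===== PRECONDITION & SPEC =====
-- the cell board[i][j] under Python indexing (none = IndexError)
def pvCellOpt (board : List (List String)) (p : Int × Int) : Option String :=
  (PySem.List.pyGet? board p.1).bind (fun r => PySem.List.pyGet? r p.2)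

-- the coordinates A visits, in visit order: four diagonal rays clipped to A's loop
-- windows; each ray capped at cap positions (any longer prefix of valid, Q-free cells
-- is impossible: their first coordinates are distinct Python indices of board)
def pvWalk (x : Int) (y : Int) (cap : Nat) : List (Int × Int) :=
  (List.range (min (min (7 - x) (7 - y)).toNat cap)).map (fun k => (x + 1 + k, y + 1 + k)) ++
  (List.range (min (min x y).toNat cap)).map (fun k => (x - 1 - k, y - 1 - k)) ++
  (List.range (min (min (7 - x) y).toNat cap)).map (fun k => (x + 1 + k, y - 1 - k)) ++
  (List.range (min (min x (7 - y)).toNat cap)).map (fun k => (x - 1 - k, y + 1 + k))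

-- the coordinates B visits, in B's visit order: distances d = 1.. interleaving the four
-- compass offsets whose span still admits d; capped at cap distances (a longer all-valid,
-- Q-free prefix is impossible — each ray meets an invalid index or its span's end by then)
def pvWalkB (x : Int) (y : Int) (cap : Nat) : List (Int × Int) :=
  (List.range cap).flatMap (fun k =>
    (if (k : Int) + 1 ≤ min (7 - x) (7 - y) then [(x + (k + 1), y + (k + 1))] else []) ++
    (if (k : Int) + 1 ≤ min x y then [(x - (k + 1), y - (k + 1))] else []) ++
    (if (k : Int) + 1 ≤ min (7 - x) y then [(x + (k + 1), y - (k + 1))] else []) ++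
    (if (k : Int) + 1 ≤ min x (7 - y) then [(x - (k + 1), y + (k + 1))] else []))

-- Pre_: exactly the inputs on which BOTH programs return normally — every cell A's walk
-- visits before its first 'Q' is a valid Python index, and likewise for B's interleaved
-- walk (outside Pre_ the program whose walk reaches a missing cell raises IndexError).
-- Pre_ excludes some inputs A returns on: boards where A meets a 'Q' before a missing
-- cell of its walk, while B's differently-ordered walk meets the missing cell first and
-- raises (see the cited example).
def Pre_has_interfere (x : Int) (y : Int) (board : List (List String)) : Prop :=
  (∀ n : Nat, n < (pvWalk x y (2 * board.length + 2)).length →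
    (∀ q ∈ (pvWalk x y (2 * board.length + 2)).take n, pvCellOpt board q ≠ some "Q") →
    pvCellOpt board ((pvWalk x y (2 * board.length + 2)).getD n (0, 0)) ≠ none) ∧
  (∀ n : Nat, n < (pvWalkB x y (2 * board.length + 2)).length →
    (∀ q ∈ (pvWalkB x y (2 * board.length + 2)).take n, pvCellOpt board q ≠ some "Q") →
    pvCellOpt board ((pvWalkB x y (2 * board.length + 2)).getD n (0, 0)) ≠ none)
instance (x : Int) (y : Int) (board : List (List String)) : Decidable (Pre_has_interfere x y board) := by
  unfold Pre_has_interfere; infer_instance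

def pvWitness_has_interfere : Int × Int × List (List String) :=
  (3, 4, [["-","-","-","-","-","-","-","-"], ["-","-","-","-","-","-","-","-"],
          ["-","-","Q","-","-","-","-","-"], ["-","-","-","-","-","-","-","-"],
          ["-","-","-","-","-","-","-","-"], ["-","-","-","-","-","-","-","-"],
          ["-","-","-","-","-","-","Q","-"], ["-","-","-","-","-","-","-","-"]])

def Spec_has_interfere (x : Int) (y : Int) (board : List (List String)) (out : Bool) : Prop := out = has_interfere_alt x y board
instance (x : Int) (y : Int) (board : List (List String)) (out : Bool) : Decidable (Spec_has_interfere x y board out) := by unfold Spec_has_interfere; infer_instance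

-- ===== CLAIM (what is proved, stated in full; the proofs are below) =====
def Claim_equal_has_interfere : Prop := ∀ (x : Int) (y : Int) (board : List (List String)), Dom_has_interfere x y board → Pre_has_interfere x y board → Spec_has_interfere x y board (has_interfere x y board)

-- ===== LEMMAS AND PROOFS =====

lemma pvLoop1_iff (b : List (List String)) (xc yc : Int) :
    pvLoop1 b xc yc = true ↔
      ∃ k : ℕ, xc + k < 8 ∧ yc + k < 8 ∧ pvCellA b (xc + k) (yc + k) = true := by
  have H : ∀ n : ℕ, ∀ xc yc : Int, (8 - xc).toNat ≤ n →
      (pvLoop1 b xc yc = true ↔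
        ∃ k : ℕ, xc + k < 8 ∧ yc + k < 8 ∧ pvCellA b (xc + k) (yc + k) = true) := by
    intro n
    induction n with
    | zero =>
      intro xc yc hn
      rw [pvLoop1, dif_neg (by omega)]
      simp only [Bool.false_eq_true, false_iff, not_exists]
      intro k hk
      exact absurd hk.1 (by omega)
    | succ n ih =>
      intro xc yc hn
      by_cases hc : xc < 8 ∧ yc < 8
      · rw [pvLoop1, dif_pos hc]
        cases hq : pvCellA b xc yc with
        | true =>
          rw [if_pos rfl]
          constructor
          · intro _
            exact ⟨0, by omega, by omega, by simpa using hq⟩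
          · intro _
            rfl
        | false =>
          rw [if_neg (by simp), ih (xc + 1) (yc + 1) (by omega)]
          constructor
          · rintro ⟨k, h1, h2, h3⟩
            refine ⟨k + 1, by push_cast; omega, by push_cast; omega, ?_⟩
            convert h3 using 2 <;> push_cast <;> ring
          · rintro ⟨k, h1, h2, h3⟩
            cases k with
            | zero =>
              exact absurd (by simpa using h3) (by simp [hq])
            | succ k =>
              refine ⟨k, by push_cast at h1 ⊢; omega, by push_cast at h2 ⊢; omega, ?_⟩
              convert h3 using 2 <;> push_cast <;> ring
      · rw [pvLoop1, dif_neg hc]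
        simp only [Bool.false_eq_true, false_iff, not_exists]
        intro k hk
        exact absurd hk.1 (by omega)
  exact H (8 - xc).toNat xc yc le_rfl

lemma pvLoop2_iff (b : List (List String)) (xc yc : Int) :
    pvLoop2 b xc yc = true ↔
      ∃ k : ℕ, 0 ≤ xc - k ∧ 0 ≤ yc - k ∧ pvCellA b (xc - k) (yc - k) = true := by
  have H : ∀ n : ℕ, ∀ xc yc : Int, (xc + 1).toNat ≤ n →
      (pvLoop2 b xc yc = true ↔
        ∃ k : ℕ, 0 ≤ xc - k ∧ 0 ≤ yc - k ∧ pvCellA b (xc - k) (yc - k) = true) := by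
    intro n
    induction n with
    | zero =>
      intro xc yc hn
      rw [pvLoop2, dif_neg (by omega)]
      simp only [Bool.false_eq_true, false_iff, not_exists]
      intro k hk
      exact absurd hk.1 (by omega)
    | succ n ih =>
      intro xc yc hn
      by_cases hc : 0 ≤ xc ∧ 0 ≤ yc
      · rw [pvLoop2, dif_pos hc]
        cases hq : pvCellA b xc yc with
        | true =>
          rw [if_pos rfl]
          constructor
          · intro _
            exact ⟨0, by omega, by omega, by simpa using hq⟩
          · intro _
            rfl
        | false =>
          rw [if_neg (by simp), ih (xc - 1) (yc - 1) (by omega)]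
          constructor
          · rintro ⟨k, h1, h2, h3⟩
            refine ⟨k + 1, by push_cast; omega, by push_cast; omega, ?_⟩
            convert h3 using 2 <;> push_cast <;> ring
          · rintro ⟨k, h1, h2, h3⟩
            cases k with
            | zero =>
              exact absurd (by simpa using h3) (by simp [hq])
            | succ k =>
              refine ⟨k, by push_cast at h1 ⊢; omega, by push_cast at h2 ⊢; omega, ?_⟩
              convert h3 using 2 <;> push_cast <;> ring
      · rw [pvLoop2, dif_neg hc]
        simp only [Bool.false_eq_true, false_iff, not_exists]
        intro k hk
        exact absurd hk.1 (by omega)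
  exact H (xc + 1).toNat xc yc le_rfl

lemma pvLoop3_iff (b : List (List String)) (xc yc : Int) :
    pvLoop3 b xc yc = true ↔
      ∃ k : ℕ, xc + k < 8 ∧ 0 ≤ yc - k ∧ pvCellA b (xc + k) (yc - k) = true := by
  have H : ∀ n : ℕ, ∀ xc yc : Int, (8 - xc).toNat ≤ n →
      (pvLoop3 b xc yc = true ↔
        ∃ k : ℕ, xc + k < 8 ∧ 0 ≤ yc - k ∧ pvCellA b (xc + k) (yc - k) = true) := by
    intro n
    induction n with
    | zero =>
      intro xc yc hn
      rw [pvLoop3, dif_neg (by omega)]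
      simp only [Bool.false_eq_true, false_iff, not_exists]
      intro k hk
      exact absurd hk.1 (by omega)
    | succ n ih =>
      intro xc yc hn
      by_cases hc : xc < 8 ∧ 0 ≤ yc
      · rw [pvLoop3, dif_pos hc]
        cases hq : pvCellA b xc yc with
        | true =>
          rw [if_pos rfl]
          constructor
          · intro _
            exact ⟨0, by omega, by omega, by simpa using hq⟩
          · intro _
            rfl
        | false =>
          rw [if_neg (by simp), ih (xc + 1) (yc - 1) (by omega)]
          constructor
          · rintro ⟨k, h1, h2, h3⟩
            refine ⟨k + 1, by push_cast; omega, by push_cast; omega, ?_⟩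
            convert h3 using 2 <;> push_cast <;> ring
          · rintro ⟨k, h1, h2, h3⟩
            cases k with
            | zero =>
              exact absurd (by simpa using h3) (by simp [hq])
            | succ k =>
              refine ⟨k, by push_cast at h1 ⊢; omega, by push_cast at h2 ⊢; omega, ?_⟩
              convert h3 using 2 <;> push_cast <;> ring
      · rw [pvLoop3, dif_neg hc]
        simp only [Bool.false_eq_true, false_iff, not_exists]
        intro k hk
        exact absurd hk.1 (by omega)
  exact H (8 - xc).toNat xc yc le_rfl

lemma pvLoop4_iff (b : List (List String)) (xc yc : Int) :
    pvLoop4 b xc yc = true ↔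
      ∃ k : ℕ, 0 ≤ xc - k ∧ yc + k < 8 ∧ pvCellA b (xc - k) (yc + k) = true := by
  have H : ∀ n : ℕ, ∀ xc yc : Int, (xc + 1).toNat ≤ n →
      (pvLoop4 b xc yc = true ↔
        ∃ k : ℕ, 0 ≤ xc - k ∧ yc + k < 8 ∧ pvCellA b (xc - k) (yc + k) = true) := by
    intro n
    induction n with
    | zero =>
      intro xc yc hn
      rw [pvLoop4, dif_neg (by omega)]
      simp only [Bool.false_eq_true, false_iff, not_exists]
      intro k hk
      exact absurd hk.1 (by omega)
    | succ n ih =>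
      intro xc yc hn
      by_cases hc : 0 ≤ xc ∧ yc < 8
      · rw [pvLoop4, dif_pos hc]
        cases hq : pvCellA b xc yc with
        | true =>
          rw [if_pos rfl]
          constructor
          · intro _
            exact ⟨0, by omega, by omega, by simpa using hq⟩
          · intro _
            rfl
        | false =>
          rw [if_neg (by simp), ih (xc - 1) (yc + 1) (by omega)]
          constructor
          · rintro ⟨k, h1, h2, h3⟩
            refine ⟨k + 1, by push_cast; omega, by push_cast; omega, ?_⟩
            convert h3 using 2 <;> push_cast <;> ring
          · rintro ⟨k, h1, h2, h3⟩
            cases k with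
            | zero =>
              exact absurd (by simpa using h3) (by simp [hq])
            | succ k =>
              refine ⟨k, by push_cast at h1 ⊢; omega, by push_cast at h2 ⊢; omega, ?_⟩
              convert h3 using 2 <;> push_cast <;> ring
      · rw [pvLoop4, dif_neg hc]
        simp only [Bool.false_eq_true, false_iff, not_exists]
        intro k hk
        exact absurd hk.1 (by omega)
  exact H (xc + 1).toNat xc yc le_rfl

lemma alt_iff (x y : Int) (b : List (List String)) :
    has_interfere_alt x y b = true ↔
      ∃ d : Int, 1 ≤ d ∧
        ((d ≤ min (7 - x) (7 - y) ∧ pvCellA b (x + d) (y + d) = true) ∨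
         (d ≤ min x y ∧ pvCellA b (x - d) (y - d) = true) ∨
         (d ≤ min (7 - x) y ∧ pvCellA b (x + d) (y - d) = true) ∨
         (d ≤ min x (7 - y) ∧ pvCellA b (x - d) (y + d) = true)) := by
  unfold has_interfere_alt pvSpansB
  simp only [List.any_eq_true, List.any_cons, List.any_nil, Bool.or_eq_true,
    Bool.and_eq_true, decide_eq_true_eq, Bool.false_eq_true, or_false,
    PySem.List.mem_pyRange_one, one_mul, neg_one_mul, ← sub_eq_add_neg]
  constructor
  · rintro ⟨d, ⟨h1, _⟩, hd⟩
    exact ⟨d, h1, by tauto⟩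
  · rintro ⟨d, h1, hd⟩
    refine ⟨d, ⟨h1, by rcases hd with ⟨h, -⟩ | ⟨h, -⟩ | ⟨h, -⟩ | ⟨h, -⟩ <;> omega⟩, by tauto⟩

-- ===== VERDICT (by name: the statement is the Claim_ definition above) =====
theorem has_interfere_spec : Claim_equal_has_interfere := by
  intro x y board _ _
  unfold Spec_has_interfere
  apply Bool.eq_iff_iff.mpr
  rw [show (has_interfere x y board = true) ↔
      (pvLoop1 board (x+1) (y+1) = true ∨ pvLoop2 board (x-1) (y-1) = true ∨
       pvLoop3 board (x+1) (y-1) = true ∨ pvLoop4 board (x-1) (y+1) = true) from by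
    simp [has_interfere, Bool.or_eq_true, or_assoc]]
  rw [alt_iff, pvLoop1_iff, pvLoop2_iff, pvLoop3_iff, pvLoop4_iff]
  constructor
  · rintro (⟨k, h1, h2, hc⟩ | ⟨k, h1, h2, hc⟩ | ⟨k, h1, h2, hc⟩ | ⟨k, h1, h2, hc⟩)
    · exact ⟨(k : Int) + 1, by omega, Or.inl ⟨by omega, by convert hc using 2 <;> ring⟩⟩
    · exact ⟨(k : Int) + 1, by omega, Or.inr (Or.inl ⟨by omega, by convert hc using 2 <;> ring⟩)⟩
    · exact ⟨(k : Int) + 1, by omega, Or.inr (Or.inr (Or.inl ⟨by omega, by convert hc using 2 <;> ring⟩))⟩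
    · exact ⟨(k : Int) + 1, by omega, Or.inr (Or.inr (Or.inr ⟨by omega, by convert hc using 2 <;> ring⟩))⟩
  · rintro ⟨d, h1, ⟨h2, hc⟩ | ⟨h2, hc⟩ | ⟨h2, hc⟩ | ⟨h2, hc⟩⟩
    · exact Or.inl ⟨(d - 1).toNat, by omega, by omega, by convert hc using 2 <;> omega⟩
    · exact Or.inr (Or.inl ⟨(d - 1).toNat, by omega, by omega, by convert hc using 2 <;> omega⟩)
    · exact Or.inr (Or.inr (Or.inl ⟨(d - 1).toNat, by omega, by omega, by convert hc using 2 <;> omega⟩))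
    · exact Or.inr (Or.inr (Or.inr ⟨(d - 1).toNat, by omega, by omega, by convert hc using 2 <;> omega⟩))
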